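-- pv_equiv track=rewrite | github.com/SurajBilgi/Enterprise-Call-Intelligence-Platform | services/summarization_service.py | _has_negative_sentiment
-- ===== SOURCE A (Python) =====
-- def _has_negative_sentiment(text: str) -> bool:
--     """Quick negative sentiment check"""
--     negative_words = [
--         "terrible",
--         "awful",
--         "horrible",
--         "frustrated",
--         "angry",
--         "disappointed",
--         "issue",
--         "problem",
--         "error",
--     ]
--     text_lower = text.lower()
--     return any(word in text_lower for word in negative_words)
-- ===== SOURCE B (Python) =====
-- NEGATIVE_WORDS = (
--     "terrible", "awful", "horrible", "frustrated", "angry",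
--     "disappointed", "issue", "problem", "error",
-- )
--
-- def _has_negative_sentiment(text: str) -> bool:
--     """Single left-to-right pass: at each position of the lowered text,
--     check whether any negative keyword starts there."""
--     t = text.lower()
--     return any(t.startswith(w, i) for i in range(len(t) + 1) for w in NEGATIVE_WORDS)
-- ===== Notes on version B (the rewrite author's own statement) =====
-- stated objective: alternative
-- what changed: Replaces nine separate substring scans (keyword-major, one 'in' scan per word) by a single position-major left-to-right pass that at each index of the lowered text checks whether any keyword starts there.
import Mathlib
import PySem

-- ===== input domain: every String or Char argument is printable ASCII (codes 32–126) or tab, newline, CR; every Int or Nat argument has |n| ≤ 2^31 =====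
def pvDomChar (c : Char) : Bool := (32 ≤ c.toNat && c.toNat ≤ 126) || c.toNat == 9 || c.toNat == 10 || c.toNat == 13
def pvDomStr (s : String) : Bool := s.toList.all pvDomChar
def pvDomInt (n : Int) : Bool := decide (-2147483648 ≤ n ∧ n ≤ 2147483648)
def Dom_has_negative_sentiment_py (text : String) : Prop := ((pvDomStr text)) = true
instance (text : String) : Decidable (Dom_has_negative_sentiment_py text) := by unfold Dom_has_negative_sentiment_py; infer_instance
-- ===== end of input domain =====

-- ===== PORT A =====
-- header: B makes one position-major pass over the lowered text instead of nine keyword-major substring scans (alternative decomposition, same cost).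
def pvNegWordsA : List String :=
  ["terrible", "awful", "horrible", "frustrated", "angry",
   "disappointed", "issue", "problem", "error"]

def has_negative_sentiment_py (text : String) : Bool :=
  let text_lower := PySem.Str.lower text
  pvNegWordsA.any (fun word => PySem.Str.isIn word text_lower)

-- ===== PORT B =====
def pvNegWordsB : List (List Char) :=
  ["terrible".toList, "awful".toList, "horrible".toList, "frustrated".toList, "angry".toList,
   "disappointed".toList, "issue".toList, "problem".toList, "error".toList]

-- t.startswith(w, i) over positions i = 0 .. len t: recursion over the suffixes of t
def pvScan (l : List Char) : Bool :=
  (pvNegWordsB.any (fun w => w.isPrefixOf l)) ||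
    (match l with
     | [] => false
     | _ :: t => pvScan t)

def has_negative_sentiment_py_alt (text : String) : Bool :=
  pvScan (PySem.Str.lower text).toList

-- ===== PRECONDITION & SPEC =====
def Spec_has_negative_sentiment_py (text : String) (out : Bool) : Prop := out = has_negative_sentiment_py_alt text
instance (text : String) (out : Bool) : Decidable (Spec_has_negative_sentiment_py text out) := by unfold Spec_has_negative_sentiment_py; infer_instance

-- ===== CLAIM (what is proved, stated in full; the proofs are below) =====
def Claim_equal_has_negative_sentiment_py : Prop := ∀ (text : String), Dom_has_negative_sentiment_py text → Spec_has_negative_sentiment_py text (has_negative_sentiment_py text)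

-- ===== LEMMAS AND PROOFS =====

-- ===== VERDICT (by name: the statement is the Claim_ definition above) =====
lemma pvScan_iff (l : List Char) :
    pvScan l = true ↔ ∃ w ∈ pvNegWordsB, w <:+: l := by
  induction l with
  | nil =>
    rw [pvScan]
    simp only [List.infix_nil]
    decide
  | cons c t ih =>
    rw [pvScan]
    simp only [Bool.or_eq_true, List.any_eq_true, ih]
    constructor
    · rintro (⟨w, hw, hp⟩ | ⟨w, hw, hi⟩)
      · exact ⟨w, hw, (List.IsPrefix.isInfix (List.isPrefixOf_iff_prefix.mp hp))⟩
      · exact ⟨w, hw, List.infix_cons hi⟩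
    · rintro ⟨w, hw, hi⟩
      rcases List.infix_cons_iff.mp hi with hp | hi
      · exact Or.inl ⟨w, hw, List.isPrefixOf_iff_prefix.mpr hp⟩
      · exact Or.inr ⟨w, hw, hi⟩

theorem has_negative_sentiment_py_spec : Claim_equal_has_negative_sentiment_py := by
  intro text _
  unfold Spec_has_negative_sentiment_py
  unfold has_negative_sentiment_py has_negative_sentiment_py_alt
  rw [Bool.eq_iff_iff, List.any_eq_true, pvScan_iff]
  constructor
  · rintro ⟨w, hw, hin⟩
    refine ⟨w.toList, ?_, (PySem.Str.isIn_iff_infix ..).mp hin⟩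
    fin_cases hw <;> decide
  · rintro ⟨w, hw, hi⟩
    refine ⟨String.ofList w, ?_, ?_⟩
    · fin_cases hw <;> decide
    · rw [PySem.Str.isIn_iff_infix, String.toList_ofList]; exact hi
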